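-- pv_equiv track=rewrite | github.com/MunishUpadhyay/YuVA-Wellness | app/routers/chat.py | get_follow_up_suggestions
-- ===== SOURCE A (Python) =====
-- from typing import List, Dict, Optional
--
-- def get_follow_up_suggestions(user_message: str, lang: str) -> List[str]:
--     """Generate contextual follow-up suggestions"""
--
--     suggestions = []
--     message_lower = user_message.lower()
--
--     # Emotion-based suggestions
--     if any(word in message_lower for word in ['anxious', 'anxiety', 'worried', 'nervous']):
--         suggestions = [
--             "Can you tell me more about what's making you feel anxious?",
--             "Would you like to try a breathing exercise together?",
--             "What usually helps you when you feel this way?"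
--         ]
--     elif any(word in message_lower for word in ['sad', 'depressed', 'down', 'lonely']):
--         suggestions = [
--             "What's been weighing on your mind lately?",
--             "Is there someone you feel comfortable talking to?",
--             "What's one small thing that usually brings you comfort?"
--         ]
--     elif any(word in message_lower for word in ['stress', 'stressed', 'overwhelmed', 'pressure']):
--         suggestions = [
--             "What's the biggest source of stress for you right now?",
--             "How do you usually handle stressful situations?",
--             "Would it help to break down what you're dealing with?"
--         ]
--     elif any(word in message_lower for word in ['happy', 'good', 'great', 'excited', 'joy']):
--         suggestions = [
--             "That's wonderful! What's making you feel so positive?",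
--             "I'd love to hear more about what's going well!",
--             "How can you carry this positive energy forward?"
--         ]
--     else:
--         # General suggestions
--         suggestions = [
--             "How has your day been overall?",
--             "What's one thing you're grateful for today?",
--             "Is there anything specific you'd like to talk about?"
--         ]
--
--     # Limit to 3 suggestions
--     return suggestions[:3]
-- ===== SOURCE B (Python) =====
-- _KEYWORD_PRIORITY = {
--     'anxious': 0, 'anxiety': 0, 'worried': 0, 'nervous': 0,
--     'sad': 1, 'depressed': 1, 'down': 1, 'lonely': 1,
--     'stress': 2, 'stressed': 2, 'overwhelmed': 2, 'pressure': 2,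
--     'happy': 3, 'good': 3, 'great': 3, 'excited': 3, 'joy': 3,
-- }
--
-- _RESPONSES = [
--     [
--         "Can you tell me more about what's making you feel anxious?",
--         "Would you like to try a breathing exercise together?",
--         "What usually helps you when you feel this way?"
--     ],
--     [
--         "What's been weighing on your mind lately?",
--         "Is there someone you feel comfortable talking to?",
--         "What's one small thing that usually brings you comfort?"
--     ],
--     [
--         "What's the biggest source of stress for you right now?",
--         "How do you usually handle stressful situations?",
--         "Would it help to break down what you're dealing with?"
--     ],
--     [
--         "That's wonderful! What's making you feel so positive?",
--         "I'd love to hear more about what's going well!",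
--         "How can you carry this positive energy forward?"
--     ],
--     [
--         "How has your day been overall?",
--         "What's one thing you're grateful for today?",
--         "Is there anything specific you'd like to talk about?"
--     ],
-- ]
--
--
-- def get_follow_up_suggestions(user_message: str, lang: str):
--     """Generate contextual follow-up suggestions.
--
--     Single pass over a flat keyword->priority map keeping the minimum
--     matched priority; priority 4 (no match) selects the general responses.
--     """
--     message_lower = user_message.lower()
--     best = 4
--     for kw, prio in _KEYWORD_PRIORITY.items():
--         if kw in message_lower and prio < best:
--             best = prio
--     return _RESPONSES[best][:3]
-- ===== Notes on version B (the rewrite author's own statement) =====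
-- stated objective: alternative
-- what changed: Replaces the ordered if/elif group dispatch by a flat keyword-to-priority map scanned once while maintaining a running minimum matched priority, which then indexes a response table (4 = no match = general responses).
import Mathlib
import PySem

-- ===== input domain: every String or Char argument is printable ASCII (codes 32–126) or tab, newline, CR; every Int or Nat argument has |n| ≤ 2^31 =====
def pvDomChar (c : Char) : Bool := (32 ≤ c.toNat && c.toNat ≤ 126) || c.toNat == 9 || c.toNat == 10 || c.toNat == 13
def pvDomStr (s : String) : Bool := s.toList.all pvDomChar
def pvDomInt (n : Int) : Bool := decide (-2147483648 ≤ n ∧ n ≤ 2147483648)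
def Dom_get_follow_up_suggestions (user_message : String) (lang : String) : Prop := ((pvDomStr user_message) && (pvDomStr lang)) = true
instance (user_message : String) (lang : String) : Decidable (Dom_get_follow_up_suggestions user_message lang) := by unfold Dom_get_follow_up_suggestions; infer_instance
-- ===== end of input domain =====

-- B replaces A's ordered if/elif group dispatch by a flat keyword->priority map scanned once with a running minimum, indexing a response table (alternative decomposition, same cost).


-- ===== PORT A =====
def get_follow_up_suggestions (user_message : String) (lang : String) : List String :=
  let message_lower := PySem.Str.lower user_message
  let suggestions :=
    if (["anxious", "anxiety", "worried", "nervous"] : List String).any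
        (fun word => PySem.Str.isIn word message_lower) then
      ["Can you tell me more about what's making you feel anxious?",
       "Would you like to try a breathing exercise together?",
       "What usually helps you when you feel this way?"]
    else if (["sad", "depressed", "down", "lonely"] : List String).any
        (fun word => PySem.Str.isIn word message_lower) then
      ["What's been weighing on your mind lately?",
       "Is there someone you feel comfortable talking to?",
       "What's one small thing that usually brings you comfort?"]
    else if (["stress", "stressed", "overwhelmed", "pressure"] : List String).any
        (fun word => PySem.Str.isIn word message_lower) then
      ["What's the biggest source of stress for you right now?",
       "How do you usually handle stressful situations?",
       "Would it help to break down what you're dealing with?"]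
    else if (["happy", "good", "great", "excited", "joy"] : List String).any
        (fun word => PySem.Str.isIn word message_lower) then
      ["That's wonderful! What's making you feel so positive?",
       "I'd love to hear more about what's going well!",
       "How can you carry this positive energy forward?"]
    else
      ["How has your day been overall?",
       "What's one thing you're grateful for today?",
       "Is there anything specific you'd like to talk about?"]
  PySem.List.slice suggestions none (some 3)

-- ===== PORT B =====
-- flat keyword -> priority map (dict of Source B, insertion order; priorities are the Nat values 0..3)
def pvKwPriority : List (String × Nat) :=
  [("anxious", 0), ("anxiety", 0), ("worried", 0), ("nervous", 0),
   ("sad", 1), ("depressed", 1), ("down", 1), ("lonely", 1),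
   ("stress", 2), ("stressed", 2), ("overwhelmed", 2), ("pressure", 2),
   ("happy", 3), ("good", 3), ("great", 3), ("excited", 3), ("joy", 3)]

def pvResponses : List (List String) :=
  [["Can you tell me more about what's making you feel anxious?",
    "Would you like to try a breathing exercise together?",
    "What usually helps you when you feel this way?"],
   ["What's been weighing on your mind lately?",
    "Is there someone you feel comfortable talking to?",
    "What's one small thing that usually brings you comfort?"],
   ["What's the biggest source of stress for you right now?",
    "How do you usually handle stressful situations?",
    "Would it help to break down what you're dealing with?"],
   ["That's wonderful! What's making you feel so positive?",
    "I'd love to hear more about what's going well!",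
    "How can you carry this positive energy forward?"],
   ["How has your day been overall?",
    "What's one thing you're grateful for today?",
    "Is there anything specific you'd like to talk about?"]]

def get_follow_up_suggestions_alt (user_message : String) (lang : String) : List String :=
  let message_lower := PySem.Str.lower user_message
  -- the for-loop of Source B: running minimum matched priority, starting at 4
  let best := pvKwPriority.foldl
    (fun best p => if PySem.Str.isIn p.1 message_lower && decide (p.2 < best) then p.2 else best) 4
  -- _RESPONSES[best]: best ∈ [0,4] is always a valid index of the 5-entry table, so getD is exact
  PySem.List.slice (pvResponses.getD best []) none (some 3)

-- ===== PRECONDITION & SPEC =====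
def Spec_get_follow_up_suggestions (user_message : String) (lang : String) (out : List String) : Prop := out = get_follow_up_suggestions_alt user_message lang
instance (user_message : String) (lang : String) (out : List String) : Decidable (Spec_get_follow_up_suggestions user_message lang out) := by unfold Spec_get_follow_up_suggestions; infer_instance

-- ===== CLAIM (what is proved, stated in full; the proofs are below) =====
def Claim_equal_get_follow_up_suggestions : Prop := ∀ (user_message : String) (lang : String), Dom_get_follow_up_suggestions user_message lang → Spec_get_follow_up_suggestions user_message lang (get_follow_up_suggestions user_message lang)

-- ===== LEMMAS AND PROOFS =====

-- folding the running-minimum step over a constant-priority keyword group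
lemma pv_foldl_const_group (m : String) (c : Nat) (g : List String) (acc : Nat) :
    (g.map (fun k => (k, c))).foldl
      (fun best p => if PySem.Str.isIn p.1 m && decide (p.2 < best) then p.2 else best) acc
    = if g.any (fun k => PySem.Str.isIn k m) && decide (c < acc) then c else acc := by
  induction g generalizing acc with
  | nil => simp
  | cons k t ih =>
    simp only [List.map_cons, List.foldl_cons, List.any_cons]
    by_cases hk : PySem.Str.isIn k m = true
    · by_cases hca : c < acc
      · simp only [hk, decide_eq_true hca, Bool.true_or, Bool.and_self, if_true]
        rw [ih c]
        simp
      · simp only [hk, decide_eq_false hca, Bool.and_false, Bool.false_eq_true, if_false]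
        rw [ih acc]
        simp only [decide_eq_false hca, Bool.and_false, Bool.false_eq_true, if_false]
    · rw [Bool.not_eq_true] at hk
      simp only [hk, Bool.false_and, Bool.false_or, Bool.false_eq_true, if_false]
      exact ih acc

-- ===== VERDICT (by name: the statement is the Claim_ definition above) =====
theorem get_follow_up_suggestions_spec : Claim_equal_get_follow_up_suggestions := by
  intro user_message lang _
  unfold Spec_get_follow_up_suggestions get_follow_up_suggestions get_follow_up_suggestions_alt
  rw [show pvKwPriority =
      ((["anxious", "anxiety", "worried", "nervous"] : List String).map (fun k => (k, (0 : Nat))))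
      ++ ((["sad", "depressed", "down", "lonely"] : List String).map (fun k => (k, (1 : Nat))))
      ++ ((["stress", "stressed", "overwhelmed", "pressure"] : List String).map (fun k => (k, (2 : Nat))))
      ++ ((["happy", "good", "great", "excited", "joy"] : List String).map (fun k => (k, (3 : Nat)))) from rfl]
  simp only [List.foldl_append, pv_foldl_const_group]
  cases h0 : (["anxious", "anxiety", "worried", "nervous"] : List String).any
      (fun word => PySem.Str.isIn word (PySem.Str.lower user_message)) <;>
    cases h1 : (["sad", "depressed", "down", "lonely"] : List String).any
      (fun word => PySem.Str.isIn word (PySem.Str.lower user_message)) <;>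
    cases h2 : (["stress", "stressed", "overwhelmed", "pressure"] : List String).any
      (fun word => PySem.Str.isIn word (PySem.Str.lower user_message)) <;>
    cases h3 : (["happy", "good", "great", "excited", "joy"] : List String).any
      (fun word => PySem.Str.isIn word (PySem.Str.lower user_message)) <;>
    rfl
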